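-- pv_equiv track=rewrite | github.com/davidarthurian/RF-Project | clustering.py | cluster_peaks
-- ===== SOURCE A (Python) =====
-- def cluster_peaks(peaks, max_gap=3):
--     if len(peaks) == 0:
--         return []
--
--     clusters = []
--     current_cluster = [peaks[0]]
--
--     for i in range(1, len(peaks)):
--         if peaks[i] - peaks[i - 1] <= max_gap:
--             current_cluster.append(peaks[i])
--         else:
--             clusters.append(current_cluster)
--             current_cluster = [peaks[i]]
--
--     clusters.append(current_cluster)
--     return clusters
-- ===== SOURCE B (Python) =====
-- def cluster_peaks(peaks, max_gap=3):
--     if len(peaks) == 0: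
--         return []
--     cuts = [0]
--     for i in range(1, len(peaks)):
--         if peaks[i] - peaks[i - 1] > max_gap:
--             cuts.append(i)
--     cuts.append(len(peaks))
--     return [peaks[a:b] for a, b in zip(cuts, cuts[1:])]
-- ===== Notes on version B (the rewrite author's own statement) =====
-- stated objective: alternative
-- what changed: B separates the work into two phases: first compute the list of cut indices (where the gap exceeds max_gap), then build the clusters by slicing peaks between consecutive cut points, instead of A's single pass maintaining a growing current-cluster accumulator.
import Mathlib
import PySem

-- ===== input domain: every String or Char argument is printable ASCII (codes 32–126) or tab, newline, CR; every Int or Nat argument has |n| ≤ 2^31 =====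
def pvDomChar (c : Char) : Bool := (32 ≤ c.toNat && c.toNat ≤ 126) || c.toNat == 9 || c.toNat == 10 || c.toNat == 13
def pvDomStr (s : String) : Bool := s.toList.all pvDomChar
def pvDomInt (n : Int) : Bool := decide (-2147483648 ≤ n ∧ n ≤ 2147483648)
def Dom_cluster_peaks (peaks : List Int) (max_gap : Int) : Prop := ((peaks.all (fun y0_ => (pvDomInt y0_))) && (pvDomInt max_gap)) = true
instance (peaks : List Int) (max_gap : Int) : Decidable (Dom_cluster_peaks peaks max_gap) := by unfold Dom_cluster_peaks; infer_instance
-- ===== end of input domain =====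

-- B replaces A's single accumulator pass by a two-phase decomposition (collect cut
-- indices, then slice between consecutive cuts); objective: alternative (same cost).

-- ===== PORT A =====
-- literal transliteration of A: guard on empty, fold over range(1, len) carrying
-- (clusters, current_cluster); indexing peaks[i] via pyGetD (indices are in range).
def cluster_peaks (peaks : List Int) (max_gap : Int) : List (List Int) :=
  if peaks.length = 0 then []
  else
    let r := (PySem.List.pyRange 1 (peaks.length : Int) 1).foldl
      (fun (st : List (List Int) × List Int) i =>
        if PySem.List.pyGetD peaks i 0 - PySem.List.pyGetD peaks (i - 1) 0 ≤ max_gap then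
          (st.1, st.2 ++ [PySem.List.pyGetD peaks i 0])
        else
          (st.1 ++ [st.2], [PySem.List.pyGetD peaks i 0]))
      (([] : List (List Int)), [PySem.List.pyGetD peaks 0 0])
    r.1 ++ [r.2]

-- ===== PORT B =====
-- literal transliteration of Source B: guard on empty, collect cut indices, then slice.
def cluster_peaks_alt (peaks : List Int) (max_gap : Int) : List (List Int) :=
  if peaks.length = 0 then []
  else
    let cuts := ((PySem.List.pyRange 1 (peaks.length : Int) 1).foldl
      (fun (acc : List Int) i =>
        if PySem.List.pyGetD peaks i 0 - PySem.List.pyGetD peaks (i - 1) 0 > max_gap then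
          acc ++ [i] else acc) [(0 : Int)]) ++ [((peaks.length : Int))]
    (cuts.zip (PySem.List.slice cuts (some 1) none)).map
      (fun ab => PySem.List.slice peaks (some ab.1) (some ab.2))

-- ===== PRECONDITION & SPEC =====
def Spec_cluster_peaks (peaks : List Int) (max_gap : Int) (out : List (List Int)) : Prop := out = cluster_peaks_alt peaks max_gap
instance (peaks : List Int) (max_gap : Int) (out : List (List Int)) : Decidable (Spec_cluster_peaks peaks max_gap out) := by unfold Spec_cluster_peaks; infer_instance

-- ===== CLAIM (what is proved, stated in full; the proofs are below) =====
def Claim_equal_cluster_peaks : Prop := ∀ (peaks : List Int) (max_gap : Int), Dom_cluster_peaks peaks max_gap → Spec_cluster_peaks peaks max_gap (cluster_peaks peaks max_gap)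

-- ===== LEMMAS AND PROOFS =====

-- consecutive pairs of a list of cut points
def pvPairs (xs : List Int) : List (Int × Int) := xs.zip xs.tail

-- the clusters named by a list of cut points
def pvSlices (peaks : List Int) (xs : List Int) : List (List Int) :=
  (pvPairs xs).map (fun ab => PySem.List.slice peaks (some ab.1) (some ab.2))

lemma pvPairs_snoc : ∀ (xs : List Int) (z : Int) (h : xs ≠ []),
    pvPairs (xs ++ [z]) = pvPairs xs ++ [(xs.getLast h, z)]
  | [a], z, _ => rfl
  | a :: b :: t, z, _ => by
      have ih := pvPairs_snoc (b :: t) z (by simp)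
      simp only [pvPairs, List.cons_append, List.tail, List.zip_cons_cons] at ih ⊢
      simp [ih]

lemma pvSlices_snoc (peaks : List Int) (xs : List Int) (z : Int) (h : xs ≠ []) :
    pvSlices peaks (xs ++ [z]) =
      pvSlices peaks xs ++ [PySem.List.slice peaks (some (xs.getLast h)) (some z)] := by
  simp [pvSlices, pvPairs_snoc xs z h]

lemma slice_extend (peaks : List Int) {c a : Int} (hc : 0 ≤ c) (hca : c ≤ a)
    (ha : a < (peaks.length : Int)) :
    PySem.List.slice peaks (some c) (some a) ++ [PySem.List.pyGetD peaks a 0] =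
      PySem.List.slice peaks (some c) (some (a + 1)) := by
  have h0a : 0 ≤ a := le_trans hc hca
  have ha' : a.toNat < peaks.length := by omega
  rw [PySem.List.slice_toNat peaks hc h0a, PySem.List.slice_toNat peaks hc (by omega),
      PySem.List.pyGetD_eq_getElem peaks 0 h0a ha]
  have h1 : (a + 1).toNat - c.toNat = (a.toNat - c.toNat) + 1 := by omega
  rw [h1, List.take_add_one]
  have h2 : (List.drop c.toNat peaks)[a.toNat - c.toNat]? = some peaks[a.toNat] := by
    rw [List.getElem?_drop]
    have : c.toNat + (a.toNat - c.toNat) = a.toNat := by omega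
    rw [this, List.getElem?_eq_getElem ha']
  simp [h2]

lemma slice_single (peaks : List Int) {a : Int} (h0 : 0 ≤ a) (ha : a < (peaks.length : Int)) :
    [PySem.List.pyGetD peaks a 0] = PySem.List.slice peaks (some a) (some (a + 1)) := by
  have := slice_extend peaks h0 (le_refl a) ha
  rw [PySem.List.slice_toNat peaks h0 h0] at this
  simpa using this

-- loop invariant: running A's fold from index a with current cluster peaks[c:a] and
-- finished clusters pvSlices (cuts ++ [c]) yields the slices of B's final cut list.
lemma pv_main (peaks : List Int) (g : Int) : ∀ (k : Nat) (a c : Int) (cuts : List Int),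
    ((peaks.length : Int) - a).toNat = k → 0 ≤ c → c < a → a ≤ (peaks.length : Int) →
    (let r := (PySem.List.pyRange a (peaks.length : Int) 1).foldl
        (fun (st : List (List Int) × List Int) i =>
          if PySem.List.pyGetD peaks i 0 - PySem.List.pyGetD peaks (i - 1) 0 ≤ g then
            (st.1, st.2 ++ [PySem.List.pyGetD peaks i 0])
          else
            (st.1 ++ [st.2], [PySem.List.pyGetD peaks i 0]))
        (pvSlices peaks (cuts ++ [c]), PySem.List.slice peaks (some c) (some a))
     r.1 ++ [r.2])
    = pvSlices peaks (((PySem.List.pyRange a (peaks.length : Int) 1).foldl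
        (fun (acc : List Int) i =>
          if PySem.List.pyGetD peaks i 0 - PySem.List.pyGetD peaks (i - 1) 0 > g then
            acc ++ [i] else acc) (cuts ++ [c])) ++ [((peaks.length : Int))]) := by
  intro k
  induction k with
  | zero =>
      intro a c cuts hk hc hca han
      have haeq : a = (peaks.length : Int) := by omega
      subst haeq
      have hnil : PySem.List.pyRange (peaks.length : Int) (peaks.length : Int) 1 = [] := by
        simp [PySem.List.pyRange]
      simp only [hnil, List.foldl_nil]
      rw [pvSlices_snoc peaks (cuts ++ [c]) _ (by simp), List.getLast_concat]
  | succ k ih =>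
      intro a c cuts hk hc hca han
      have hab : a < (peaks.length : Int) := by omega
      rw [PySem.List.pyRange_one_cons hab]
      simp only [List.foldl_cons]
      by_cases hcond : PySem.List.pyGetD peaks a 0 - PySem.List.pyGetD peaks (a - 1) 0 ≤ g
      · rw [if_pos hcond, if_neg (by omega)]
        have hex := slice_extend peaks hc (le_of_lt hca) hab
        have := ih (a + 1) c cuts (by omega) hc (by omega) (by omega)
        simpa [hex] using this
      · rw [if_neg hcond, if_pos (by omega)]
        have hsnoc := pvSlices_snoc peaks (cuts ++ [c]) a (by simp)
        rw [List.getLast_concat] at hsnoc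
        have hsnoc' : pvSlices peaks (cuts ++ [c, a]) =
            pvSlices peaks (cuts ++ [c]) ++ [PySem.List.slice peaks (some c) (some a)] := by
          simpa using hsnoc
        have hsingle := slice_single peaks (le_trans hc (le_of_lt hca)) hab
        have := ih (a + 1) a (cuts ++ [c]) (by omega) (by omega) (by omega) (by omega)
        simpa [hsnoc', hsingle] using this

-- ===== VERDICT (by name: the statement is the Claim_ definition above) =====
theorem cluster_peaks_spec : Claim_equal_cluster_peaks := by
  intro peaks g _hdom
  unfold Spec_cluster_peaks cluster_peaks cluster_peaks_alt
  by_cases hlen : peaks.length = 0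
  · simp [hlen]
  · simp only [if_neg hlen]
    rw [PySem.List.slice_from_one]
    have hpos : (0 : Int) < (peaks.length : Int) := by
      omega
    have hinit2 : [PySem.List.pyGetD peaks 0 0] =
        PySem.List.slice peaks (some 0) (some 1) := by
      simpa using slice_single peaks (le_refl 0) hpos
    have hmain := pv_main peaks g ((peaks.length : Int) - 1).toNat 1 0 []
      rfl (le_refl 0) (by omega) (by omega)
    simp only [List.nil_append] at hmain
    have hinit1 : pvSlices peaks [0] = [] := rfl
    rw [hinit1] at hmain
    rw [← hinit2] at hmain
    simpa [pvSlices, pvPairs] using hmain
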